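-- pv_equiv track=rewrite | github.com/jhcook/agentic-dev | .agent/scripts/add_licenses.py | get_commented_header
-- ===== SOURCE A (Python) =====
-- def get_commented_header(header_text, ext):
--     lines = header_text.strip().split('\n')
--
--     # Python, Shell, YAML, Ruby, etc.
--     if ext in ['.py', '.sh', '.yaml', '.yml', '.rb']:
--         return '\n'.join([f"# {line}" if line else "#" for line in lines]) + '\n\n'
--
--     # JavaScript, TypeScript, CSS, Java, Swift, Kotlin, etc.
--     elif ext in ['.js', '.jsx', '.ts', '.tsx', '.css', '.java', '.swift', '.kt', '.go', '.c', '.cpp', '.h', '.hpp']: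
--         out = "/*\n"
--         out += '\n'.join([f" * {line}" if line else " *" for line in lines])
--         out += "\n */\n\n"
--         return out
--
--     # HTML, XML
--     elif ext in ['.html', '.xml']:
--         out = "<!--\n"
--         out += '\n'.join([f"  {line}" if line else "" for line in lines])
--         out += "\n-->\n\n"
--         return out
--
--     return ""
-- ===== SOURCE B (Python) =====
-- _STYLES = {
--     '.py': 0, '.sh': 0, '.yaml': 0, '.yml': 0, '.rb': 0,
--     '.js': 1, '.jsx': 1, '.ts': 1, '.tsx': 1, '.css': 1, '.java': 1,
--     '.swift': 1, '.kt': 1, '.go': 1, '.c': 1, '.cpp': 1, '.h': 1, '.hpp': 1,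
--     '.html': 2, '.xml': 2,
-- }
-- # (line_prefix, empty_line_marker, block_header, block_footer) per style index
-- _FMT = [('# ', '#', '', '\n\n'),
--         (' * ', ' *', '/*\n', '\n */\n\n'),
--         ('  ', '', '<!--\n', '\n-->\n\n')]
--
--
-- def get_commented_header(header_text, ext):
--     idx = _STYLES.get(ext)
--     if idx is None:
--         return ""
--     prefix, empty, head, foot = _FMT[idx]
--     s = header_text.strip()
--     # single character-level scan: emit the decoration at each line start,
--     # instead of split/per-line-format/join
--     out = [head]
--     at_start = True
--     for c in s:
--         if at_start:
--             if c == '\n':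
--                 out.append(empty)
--                 out.append('\n')
--             else:
--                 out.append(prefix)
--                 out.append(c)
--                 at_start = False
--         else:
--             out.append(c)
--             if c == '\n':
--                 at_start = True
--     if at_start:
--         out.append(empty)
--     out.append(foot)
--     return ''.join(out)
-- ===== Notes on version B (the rewrite author's own statement) =====
-- stated objective: alternative
-- what changed: Replaces A's split-into-lines / per-line comprehension / join pipeline by a single character-level scan with an at-line-start flag that emits the style's decoration at each line boundary, with the style constants held in a lookup table instead of the if/elif chain.
import Mathlib
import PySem

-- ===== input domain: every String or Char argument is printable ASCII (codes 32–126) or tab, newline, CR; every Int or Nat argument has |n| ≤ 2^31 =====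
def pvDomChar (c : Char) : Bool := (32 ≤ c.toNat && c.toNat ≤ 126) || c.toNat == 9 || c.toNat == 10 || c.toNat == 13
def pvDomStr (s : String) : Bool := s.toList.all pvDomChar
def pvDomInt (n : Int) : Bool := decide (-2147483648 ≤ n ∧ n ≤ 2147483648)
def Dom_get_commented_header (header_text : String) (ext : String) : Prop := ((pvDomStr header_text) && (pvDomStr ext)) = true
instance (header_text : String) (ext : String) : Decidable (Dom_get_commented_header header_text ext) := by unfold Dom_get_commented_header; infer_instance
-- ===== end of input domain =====

-- B replaces A's split/per-line-format/join pipeline with one character-level scan that emits the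
-- style decoration at line boundaries, driven by an extension→style table (alternative; same cost).

-- ===== PORT A =====
def get_commented_header (header_text : String) (ext : String) : String :=
  let lines := (PySem.Str.split? (PySem.Str.strip header_text) "\n").getD []
  if ([".py", ".sh", ".yaml", ".yml", ".rb"] : List String).contains ext then
    PySem.Str.join "\n" (lines.map (fun line => if line ≠ "" then "# " ++ line else "#")) ++ "\n\n"
  else if ([".js", ".jsx", ".ts", ".tsx", ".css", ".java", ".swift", ".kt", ".go", ".c", ".cpp", ".h", ".hpp"] : List String).contains ext then
    let out := "/*\n"
    let out := out ++ PySem.Str.join "\n" (lines.map (fun line => if line ≠ "" then " * " ++ line else " *"))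
    let out := out ++ "\n */\n\n"
    out
  else if ([".html", ".xml"] : List String).contains ext then
    let out := "<!--\n"
    let out := out ++ PySem.Str.join "\n" (lines.map (fun line => if line ≠ "" then "  " ++ line else ""))
    let out := out ++ "\n-->\n\n"
    out
  else
    ""

-- ===== PORT B =====
-- extension → index into pvFmt (Source B's _STYLES dict)
def pvStyles : List (String × Nat) :=
  [(".py", 0), (".sh", 0), (".yaml", 0), (".yml", 0), (".rb", 0),
   (".js", 1), (".jsx", 1), (".ts", 1), (".tsx", 1), (".css", 1), (".java", 1),
   (".swift", 1), (".kt", 1), (".go", 1), (".c", 1), (".cpp", 1), (".h", 1), (".hpp", 1),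
   (".html", 2), (".xml", 2)]

-- (line_prefix, empty_line_marker, block_header, block_footer) per style index (Source B's _FMT)
def pvFmt : List (String × String × String × String) :=
  [("# ", "#", "", "\n\n"),
   (" * ", " *", "/*\n", "\n */\n\n"),
   ("  ", "", "<!--\n", "\n-->\n\n")]

-- Source B's for-loop over the characters with the at_start flag, as structural recursion
def pvScan (pre empt : List Char) : Bool → List Char → List Char
  | true, [] => empt
  | false, [] => []
  | true, c :: rest => if c = '\n' then empt ++ '\n' :: pvScan pre empt true rest
                       else pre ++ c :: pvScan pre empt false rest
  | false, c :: rest => if c = '\n' then '\n' :: pvScan pre empt true rest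
                        else c :: pvScan pre empt false rest

def get_commented_header_alt (header_text : String) (ext : String) : String :=
  match pvStyles.lookup ext with
  | none => ""
  | some idx =>
    match pvFmt[idx]? with
    | none => ""   -- unreachable: every index stored in pvStyles is 0/1/2
    | some (pre, empt, head, foot) =>
      head ++ String.ofList (pvScan pre.toList empt.toList true (PySem.Str.strip header_text).toList) ++ foot

-- ===== PRECONDITION & SPEC =====
def Spec_get_commented_header (header_text : String) (ext : String) (out : String) : Prop := out = get_commented_header_alt header_text ext
instance (header_text : String) (ext : String) (out : String) : Decidable (Spec_get_commented_header header_text ext out) := by unfold Spec_get_commented_header; infer_instance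

-- ===== CLAIM =====
def Claim_equal_get_commented_header : Prop := ∀ (header_text : String) (ext : String), Dom_get_commented_header header_text ext → Spec_get_commented_header header_text ext (get_commented_header header_text ext)

-- ===== LEMMAS AND PROOFS =====

-- structural form of Python's '\n'-split (related to PySem.Chars.splitOn below)
def pvSplitChar (c : Char) : List Char → List (List Char)
  | [] => [[]]
  | x :: xs => if x = c then [] :: pvSplitChar c xs else (pvSplitChar c xs).modifyHead (x :: ·)

theorem pvSplitChar_ne_nil (c : Char) (s : List Char) : pvSplitChar c s ≠ [] := by
  cases s with
  | nil => simp [pvSplitChar]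
  | cons x xs =>
    simp only [pvSplitChar]
    split
    · simp
    · cases h : pvSplitChar c xs with
      | nil => exact absurd h (pvSplitChar_ne_nil c xs)
      | cons a t => simp

theorem pvGo_eq (c : Char) (fuel : Nat) (l cur : List Char) (acc : List (List Char))
    (h : l.length < fuel) :
    PySem.Chars.splitOn.go [c] fuel l cur acc
      = acc.reverse ++ (pvSplitChar c l).modifyHead (cur.reverse ++ ·) := by
  induction fuel generalizing l cur acc with
  | zero => omega
  | succ n ih =>
    cases l with
    | nil => simp [PySem.Chars.splitOn.go, pvSplitChar]
    | cons x xs =>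
      by_cases hx : x = c
      · subst hx
        have : ([x] : List Char).isPrefixOf (x :: xs) = true := by simp [List.isPrefixOf]
        simp only [PySem.Chars.splitOn.go, this, if_pos]
        have hd : List.drop ([x] : List Char).length (x :: xs) = xs := by simp
        rw [hd, ih xs [] (cur.reverse :: acc) (by simpa using Nat.lt_of_succ_lt_succ h)]
        simp [pvSplitChar]
        cases hsp : pvSplitChar x xs with
        | nil => exact absurd hsp (pvSplitChar_ne_nil x xs)
        | cons a t => simp
      · have : ([c] : List Char).isPrefixOf (x :: xs) = false := by
          simp [List.isPrefixOf]; exact fun hc => absurd hc.symm hx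
        simp only [PySem.Chars.splitOn.go, this, Bool.false_eq_true, if_false]
        rw [ih xs (x :: cur) acc (Nat.lt_of_succ_lt_succ h)]
        simp only [pvSplitChar, hx, if_false]
        cases hsp : pvSplitChar c xs with
        | nil => exact absurd hsp (pvSplitChar_ne_nil c xs)
        | cons a t => simp

theorem pvSplitOn_single (c : Char) (s : List Char) :
    PySem.Chars.splitOn s [c] = pvSplitChar c s := by
  unfold PySem.Chars.splitOn
  rw [pvGo_eq c (s.length + 1) s [] [] (Nat.lt_succ_self _)]
  cases hsp : pvSplitChar c s with
  | nil => exact absurd hsp (pvSplitChar_ne_nil c s)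
  | cons a t => simp

theorem pvSplitChar_no (c : Char) (u : List Char) (h : c ∉ u) : pvSplitChar c u = [u] := by
  induction u with
  | nil => rfl
  | cons x xs ih =>
    simp only [List.mem_cons, not_or] at h
    have hxc : ¬ x = c := fun hx => h.1 hx.symm
    simp [pvSplitChar, hxc, ih h.2]

theorem pvSplitChar_split (c : Char) (u v : List Char) (h : c ∉ u) :
    pvSplitChar c (u ++ c :: v) = u :: pvSplitChar c v := by
  induction u with
  | nil => simp [pvSplitChar]
  | cons x xs ih =>
    simp only [List.mem_cons, not_or] at h
    have hxc : ¬ x = c := fun hx => h.1 hx.symm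
    simp [pvSplitChar, hxc, ih h.2]

theorem pvScan_false_app (pre empt u t : List Char) (h : '\n' ∉ u) :
    pvScan pre empt false (u ++ t) = u ++ pvScan pre empt false t := by
  induction u with
  | nil => simp
  | cons x xs ih =>
    simp only [List.mem_cons, not_or] at h
    have hxc : ¬ x = '\n' := fun hx => h.1 hx.symm
    simp [pvScan, hxc, ih h.2]

theorem pvScan_true_no (pre empt s : List Char) (h : '\n' ∉ s) :
    pvScan pre empt true s = if s ≠ [] then pre ++ s else empt := by
  cases s with
  | nil => simp [pvScan]
  | cons x xs =>
    simp only [List.mem_cons, not_or] at h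
    have hxc : ¬ x = '\n' := fun hx => h.1 hx.symm
    have h2 := pvScan_false_app pre empt xs [] h.2
    simp only [List.append_nil] at h2
    simp [pvScan, hxc, h2]

theorem pvScan_true_split (pre empt u v : List Char) (h : '\n' ∉ u) :
    pvScan pre empt true (u ++ '\n' :: v)
      = (if u ≠ [] then pre ++ u else empt) ++ '\n' :: pvScan pre empt true v := by
  cases u with
  | nil => simp [pvScan]
  | cons x xs =>
    simp only [List.mem_cons, not_or] at h
    have h1 : pvScan pre empt false (xs ++ '\n' :: v) = xs ++ '\n' :: pvScan pre empt true v := by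
      rw [pvScan_false_app pre empt xs _ h.2]; simp [pvScan]
    have hxc : ¬ x = '\n' := fun hx => h.1 hx.symm
    simp [pvScan, hxc, h1]

-- A's join-of-formatted-lines
def pvJn (pre empt : List Char) (parts : List (List Char)) : List Char :=
  PySem.Chars.join ['\n'] (parts.map (fun l => if l ≠ [] then pre ++ l else empt))

theorem pvJn_single (pre empt a : List Char) :
    pvJn pre empt [a] = if a ≠ [] then pre ++ a else empt := by
  simp [pvJn, PySem.Chars.join, List.intercalate]

theorem pvJn_cons (pre empt a : List Char) (b : List Char) (t : List (List Char)) :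
    pvJn pre empt (a :: b :: t)
      = (if a ≠ [] then pre ++ a else empt) ++ '\n' :: pvJn pre empt (b :: t) := by
  simp [pvJn, PySem.Chars.join, List.intercalate]

theorem pvMain (pre empt : List Char) : ∀ (n : Nat) (s : List Char), s.length ≤ n →
    pvScan pre empt true s = pvJn pre empt (pvSplitChar '\n' s) := by
  intro n
  induction n with
  | zero =>
    intro s hs
    have : s = [] := List.length_eq_zero_iff.mp (Nat.le_zero.mp hs)
    subst this
    simp [pvScan, pvSplitChar, pvJn_single]
  | succ n ih =>
    intro s hs
    by_cases hmem : '\n' ∈ s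
    · set u := s.takeWhile (fun x => x ≠ '\n') with hu
      have hnu : '\n' ∉ u := by
        intro hm
        have := List.mem_takeWhile_imp hm
        simp at this
      have hdrop : s.dropWhile (fun x => x ≠ '\n') ≠ [] := by
        intro hnil
        rw [List.dropWhile_eq_nil_iff] at hnil
        have := hnil _ hmem
        simp at this
      obtain ⟨y, v, hyv⟩ := List.exists_cons_of_ne_nil hdrop
      have hy : y = '\n' := by
        have hhead := List.head_dropWhile_not (fun x => x ≠ '\n') hdrop
        have h1 : (s.dropWhile (fun x => x ≠ '\n')).head? = some y := by rw [hyv]; rfl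
        rw [List.head?_eq_some_head hdrop, Option.some_inj] at h1
        rw [h1] at hhead
        simpa using hhead
      subst hy
      have hsplit : s = u ++ '\n' :: v := by
        rw [hu, ← hyv, List.takeWhile_append_dropWhile]
      have hlen : v.length ≤ n := by
        have : s.length = u.length + (v.length + 1) := by
          rw [hsplit]; simp
        omega
      rw [hsplit, pvScan_true_split pre empt u v hnu, pvSplitChar_split '\n' u v hnu]
      cases hsp : pvSplitChar '\n' v with
      | nil => exact absurd hsp (pvSplitChar_ne_nil '\n' v)
      | cons b t =>
        rw [pvJn_cons, ← hsp, ih v hlen]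
    · rw [pvScan_true_no pre empt s hmem, pvSplitChar_no '\n' s hmem, pvJn_single]

-- the per-style equality, at the String level
theorem pvStyleEqStr (pre empt head foot st : String) :
    head ++ PySem.Str.join "\n" (((pvSplitChar '\n' st.toList).map String.ofList).map
        (fun line => if line ≠ "" then pre ++ line else empt)) ++ foot
    = head ++ String.ofList (pvScan pre.toList empt.toList true st.toList) ++ foot := by
  apply String.toList_inj.mp
  simp only [String.toList_append, PySem.Str.toList_join, List.map_map, String.toList_ofList]
  congr 2
  rw [pvMain pre.toList empt.toList st.toList.length st.toList (le_refl _)]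
  unfold pvJn
  congr 1
  apply List.map_congr_left
  intro l _
  by_cases hl : l = []
  · subst hl
    simp
  · have h1 : String.ofList l ≠ "" := fun he => hl (by simpa using congrArg String.toList he)
    simp [hl, h1, Function.comp, String.toList_append, String.toList_ofList]

-- ===== VERDICT =====
set_option maxHeartbeats 1000000 in
theorem get_commented_header_spec : Claim_equal_get_commented_header := by
  intro header_text ext _
  unfold Spec_get_commented_header get_commented_header get_commented_header_alt
  have hsplit : (PySem.Str.split? (PySem.Str.strip header_text) "\n").getD []
      = (pvSplitChar '\n' (PySem.Str.strip header_text).toList).map String.ofList := by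
    simp [PySem.Str.split?, PySem.Chars.split?, pvSplitOn_single]
  rw [hsplit]
  set st := PySem.Str.strip header_text with hst
  by_cases h1 : ([".py", ".sh", ".yaml", ".yml", ".rb"] : List String).contains ext
  · rw [List.contains_iff_mem] at h1
    simp only [List.mem_cons, List.not_mem_nil, or_false] at h1
    rcases h1 with rfl | rfl | rfl | rfl | rfl <;>
      simpa [pvStyles, pvFmt, List.lookup] using pvStyleEqStr "# " "#" "" "\n\n" st
  · by_cases h2 : ([".js", ".jsx", ".ts", ".tsx", ".css", ".java", ".swift", ".kt", ".go", ".c", ".cpp", ".h", ".hpp"] : List String).contains ext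
    · rw [List.contains_iff_mem] at h2
      simp only [List.mem_cons, List.not_mem_nil, or_false] at h2
      rcases h2 with rfl | rfl | rfl | rfl | rfl | rfl | rfl | rfl | rfl | rfl | rfl | rfl | rfl <;>
        simpa [pvStyles, pvFmt, List.lookup] using pvStyleEqStr " * " " *" "/*\n" "\n */\n\n" st
    · by_cases h3 : ([".html", ".xml"] : List String).contains ext
      · rw [List.contains_iff_mem] at h3
        simp only [List.mem_cons, List.not_mem_nil, or_false] at h3
        rcases h3 with rfl | rfl <;>
          simpa [pvStyles, pvFmt, List.lookup] using pvStyleEqStr "  " "" "<!--\n" "\n-->\n\n" st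
      · have hn : List.lookup ext pvStyles = none := by
          rw [List.lookup_eq_none_iff]
          intro p hp
          rw [List.contains_iff_mem] at h1 h2 h3
          simp only [List.mem_cons, List.not_mem_nil, or_false, not_or] at h1 h2 h3
          fin_cases hp <;> simp_all
        simp only [List.contains_iff_mem, List.mem_cons, List.not_mem_nil, or_false, not_or] at h1 h2 h3
        simp [h1, h2, h3, hn]
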